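-- pv_equiv track=rewrite | github.com/eladiomejias/Python | Encriptado Archivo/CesarArchivo.py | encripRecur
-- ===== SOURCE A (Python) =====
-- def encripRecur(clave, texto1, text, cont, cont2, N, alphabet):
-- 	if(cont2<N):
-- 		if(cont == 4):
-- 			cont = 0
--
-- 		r = int(clave[cont])
--
-- 		if(texto1[cont2] in alphabet):
-- 			pos = alphabet.index(texto1[cont2])
-- 			#sprint(alphabet[pos+r])
--
-- 			if pos+r > len(alphabet):
-- 				sitio = (pos+r)-len(alphabet)
-- 				text.append(alphabet[sitio])
-- 			else:
-- 				text.append(alphabet[pos+r])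
--
-- 		else:
-- 			text.append(texto1[cont2])
--
-- 		cont = cont + 1
-- 		cont2 = cont2 + 1
--
-- 		return encripRecur(clave, texto1, text, cont, cont2, N, alphabet)
--
-- 	else:
-- 		return text
-- ===== SOURCE B (Python) =====
-- def encripRecur(clave, texto1, text, cont, cont2, N, alphabet):
--     # Iterative decomposition of the tail recursion: one for-loop over the
--     # character positions, same branch conditions and append order as A.
--     L = len(alphabet)
--     k = cont
--     for j in range(cont2, N):
--         if k == 4:
--             k = 0
--         r = int(clave[k])
--         ch = texto1[j]
--         if ch in alphabet:
--             p = alphabet.index(ch) + r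
--             text.append(alphabet[p - L if p > L else p])
--         else:
--             text.append(ch)
--         k += 1
--     return text
-- ===== Notes on version B (the rewrite author's own statement) =====
-- stated objective: idiomatic
-- what changed: The tail recursion with 7 threaded parameters is rewritten as a plain iterative for-loop over range(cont2, N) carrying only the key index, with the two shift-lookup branches merged into one conditional-expression append; branch conditions and append order are unchanged.
import Mathlib
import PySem

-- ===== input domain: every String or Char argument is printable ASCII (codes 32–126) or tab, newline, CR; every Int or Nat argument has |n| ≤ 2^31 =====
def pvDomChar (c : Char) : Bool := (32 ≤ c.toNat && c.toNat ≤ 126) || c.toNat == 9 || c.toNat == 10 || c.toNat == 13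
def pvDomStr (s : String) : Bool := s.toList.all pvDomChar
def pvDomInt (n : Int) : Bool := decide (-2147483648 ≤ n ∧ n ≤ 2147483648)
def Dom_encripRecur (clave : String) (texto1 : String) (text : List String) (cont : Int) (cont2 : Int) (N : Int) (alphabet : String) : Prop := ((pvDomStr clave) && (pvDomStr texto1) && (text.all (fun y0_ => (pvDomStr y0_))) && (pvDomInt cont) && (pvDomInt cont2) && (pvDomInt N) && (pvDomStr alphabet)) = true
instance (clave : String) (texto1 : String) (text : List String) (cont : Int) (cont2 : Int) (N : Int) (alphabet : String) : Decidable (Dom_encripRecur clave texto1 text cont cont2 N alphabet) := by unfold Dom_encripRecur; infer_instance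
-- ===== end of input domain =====

-- B rewrites A's tail recursion as an iterative loop over the character positions (same
-- branch conditions and append order); both mutate/return the same `text` list in Python,
-- and the equivalence proved here is about the returned value.

-- ===== PORT A =====
-- Literal port of A's tail recursion. `int(clave[cont])` is PySem.Int.ofChars? on the
-- 1-char string; `t in alphabet` for a single char is char membership; `alphabet.index`
-- (guarded by membership) is idxOf on the char list. On inputs where Python raises
-- (excluded by Pre_) the port returns the text accumulated so far.
def encripRecur (clave : String) (texto1 : String) (text : List String) (cont : Int) (cont2 : Int) (N : Int) (alphabet : String) : List String :=
  if _h : cont2 < N then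
    match PySem.Str.pyGet? clave (if cont = 4 then 0 else cont) with
    | none => text
    | some kc =>
      match PySem.Int.ofChars? [kc] with
      | none => text
      | some r =>
        match PySem.Str.pyGet? texto1 cont2 with
        | none => text
        | some t =>
          if t ∈ alphabet.toList then
            if ((alphabet.toList.idxOf t : Nat) : Int) + r > PySem.Str.len alphabet then
              match PySem.Str.pyGet? alphabet (((alphabet.toList.idxOf t : Nat) : Int) + r - PySem.Str.len alphabet) with
              | none => text
              | some c => encripRecur clave texto1 (text ++ [String.ofList [c]]) ((if cont = 4 then 0 else cont) + 1) (cont2 + 1) N alphabet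
            else
              match PySem.Str.pyGet? alphabet (((alphabet.toList.idxOf t : Nat) : Int) + r) with
              | none => text
              | some c => encripRecur clave texto1 (text ++ [String.ofList [c]]) ((if cont = 4 then 0 else cont) + 1) (cont2 + 1) N alphabet
          else
            encripRecur clave texto1 (text ++ [String.ofList [t]]) ((if cont = 4 then 0 else cont) + 1) (cont2 + 1) N alphabet
  else
    text
termination_by (N - cont2).toNat
decreasing_by all_goals omega

-- ===== PORT B =====
-- One iteration of Source B's for-loop body; state = (text, key index k, ok). ok = false
-- records that Python raised (outside Pre_): the state is then left unchanged.
def encripStep (clave : String) (texto1 : String) (alphabet : String) (st : List String × Int × Bool) (j : Int) : List String × Int × Bool :=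
  match st with
  | (txt, k0, ok) =>
    if ok then
      match PySem.Str.pyGet? clave (if k0 = 4 then 0 else k0) with
      | none => (txt, k0, false)
      | some kc =>
        match PySem.Int.ofChars? [kc] with
        | none => (txt, k0, false)
        | some r =>
          match PySem.Str.pyGet? texto1 j with
          | none => (txt, k0, false)
          | some t =>
            if t ∈ alphabet.toList then
              match PySem.Str.pyGet? alphabet
                  (if ((alphabet.toList.idxOf t : Nat) : Int) + r > PySem.Str.len alphabet
                   then ((alphabet.toList.idxOf t : Nat) : Int) + r - PySem.Str.len alphabet
                   else ((alphabet.toList.idxOf t : Nat) : Int) + r) with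
              | none => (txt, k0, false)
              | some c => (txt ++ [String.ofList [c]], (if k0 = 4 then 0 else k0) + 1, true)
            else
              (txt ++ [String.ofList [t]], (if k0 = 4 then 0 else k0) + 1, true)
    else
      st

def encripRecur_alt (clave : String) (texto1 : String) (text : List String) (cont : Int) (cont2 : Int) (N : Int) (alphabet : String) : List String :=
  ((PySem.List.pyRange cont2 N 1).foldl (encripStep clave texto1 alphabet) (text, cont, true)).1

-- ===== PRECONDITION & SPEC =====
-- Closed form of the key index A uses at step k (cont is reset to 0 when it HITS 4,
-- so once it enters [0,3] it cycles mod 4; a start above 4 just keeps increasing).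
def pvUsedIdx (cont : Int) (k : Nat) : Int :=
  let u0 : Int := if cont = 4 then 0 else cont
  if u0 > 3 ∨ u0 + (k : Int) ≤ 3 then u0 + (k : Int) else (u0 + (k : Int)) % 4

-- Step k succeeds: the key char exists and is a digit, the text index is in range,
-- and the shifted alphabet index (with A's off-by-one wrap test `>` not `>=`) is in range.
def pvStepOK (clave : String) (texto1 : String) (alphabet : String) (cont : Int) (cont2 : Int) (k : Nat) : Bool :=
  match PySem.Str.pyGet? clave (pvUsedIdx cont k) with
  | none => false
  | some kc =>
    kc.isDigit &&
    (match PySem.Str.pyGet? texto1 (cont2 + (k : Int)) with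
     | none => false
     | some t =>
       if t ∈ alphabet.toList then
         let p : Int := ((alphabet.toList.idxOf t : Nat) : Int) + ((kc.toNat : Int) - 48)
         if p > PySem.Str.len alphabet then p - PySem.Str.len alphabet < PySem.Str.len alphabet
         else decide (p < PySem.Str.len alphabet)
       else true)

-- Pre_ excludes exactly the inputs on which Python A raises (IndexError on clave/texto1/
-- alphabet — including the pos+r = len(alphabet) off-by-one — or ValueError from int()).
-- The quantifier bound min(N-cont2, 2*len(texto1)) equals N-cont2 whenever the two
-- index-range conjuncts hold, and is irrelevant otherwise.
def Pre_encripRecur (clave : String) (texto1 : String) (text : List String) (cont : Int) (cont2 : Int) (N : Int) (alphabet : String) : Prop :=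
  N ≤ cont2 ∨
    (N ≤ (texto1.toList.length : Int) ∧ -(texto1.toList.length : Int) ≤ cont2 ∧
     ∀ k : Nat, k < min (N - cont2).toNat (2 * texto1.toList.length) →
       pvStepOK clave texto1 alphabet cont cont2 k = true)
instance (clave : String) (texto1 : String) (text : List String) (cont : Int) (cont2 : Int) (N : Int) (alphabet : String) : Decidable (Pre_encripRecur clave texto1 text cont cont2 N alphabet) := by unfold Pre_encripRecur; infer_instance

def pvWitness_encripRecur : String × String × List String × Int × Int × Int × String :=
  ("3141", "ab c!", [], 0, 0, 5, "abcdefghijklmnopqrstuvwxyz")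

def Spec_encripRecur (clave : String) (texto1 : String) (text : List String) (cont : Int) (cont2 : Int) (N : Int) (alphabet : String) (out : List String) : Prop := out = encripRecur_alt clave texto1 text cont cont2 N alphabet
instance (clave : String) (texto1 : String) (text : List String) (cont : Int) (cont2 : Int) (N : Int) (alphabet : String) (out : List String) : Decidable (Spec_encripRecur clave texto1 text cont cont2 N alphabet out) := by unfold Spec_encripRecur; infer_instance

-- ===== CLAIM (what is proved, stated in full; the proofs are below) =====
def Claim_equal_encripRecur : Prop := ∀ (clave : String) (texto1 : String) (text : List String) (cont : Int) (cont2 : Int) (N : Int) (alphabet : String), Dom_encripRecur clave texto1 text cont cont2 N alphabet → Pre_encripRecur clave texto1 text cont cont2 N alphabet → Spec_encripRecur clave texto1 text cont cont2 N alphabet (encripRecur clave texto1 text cont cont2 N alphabet)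

-- ===== LEMMAS AND PROOFS =====

-- Once a step has failed (ok = false) the fold leaves the state unchanged.
lemma foldl_encripStep_err (clave texto1 alphabet : String) :
    ∀ (l : List Int) (txt : List String) (k : Int),
      l.foldl (encripStep clave texto1 alphabet) (txt, k, false) = (txt, k, false) := by
  intro l
  induction l with
  | nil => intro txt k; rfl
  | cons j l ih =>
    intro txt k
    simpa [List.foldl_cons, encripStep] using ih txt k

-- The recursion of port A computes the fold of port B, for every state.
lemma encripRecur_eq_foldl (clave texto1 alphabet : String) (N : Int) :
    ∀ (n : Nat) (cont2 : Int), (N - cont2).toNat = n →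
      ∀ (text : List String) (cont : Int),
        encripRecur clave texto1 text cont cont2 N alphabet =
          ((PySem.List.pyRange cont2 N 1).foldl (encripStep clave texto1 alphabet) (text, cont, true)).1 := by
  intro n
  induction n with
  | zero =>
    intro cont2 hn text cont
    have hge : N ≤ cont2 := by omega
    rw [encripRecur, dif_neg (by omega), PySem.List.pyRange_one_eq_nil hge]
    rfl
  | succ n ih =>
    intro cont2 hn text cont
    have hlt : cont2 < N := by omega
    rw [encripRecur, dif_pos hlt, PySem.List.pyRange_one_cons hlt, List.foldl_cons]
    show _ = ((PySem.List.pyRange (cont2 + 1) N 1).foldl (encripStep clave texto1 alphabet)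
      (encripStep clave texto1 alphabet (text, cont, true) cont2)).1
    rw [encripStep]
    simp only [if_pos]
    cases hk : PySem.Str.pyGet? clave (if cont = 4 then 0 else cont) with
    | none => dsimp only; rw [foldl_encripStep_err]
    | some kc =>
      dsimp only
      cases hr : PySem.Int.ofChars? [kc] with
      | none => dsimp only; rw [foldl_encripStep_err]
      | some r =>
        dsimp only
        cases ht : PySem.Str.pyGet? texto1 cont2 with
        | none => dsimp only; rw [foldl_encripStep_err]
        | some t =>
          dsimp only
          by_cases hmem : t ∈ alphabet.toList
          · rw [if_pos hmem, if_pos hmem]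
            by_cases hgt : ((alphabet.toList.idxOf t : Nat) : Int) + r > PySem.Str.len alphabet
            · rw [if_pos hgt, if_pos hgt]
              cases ha : PySem.Str.pyGet? alphabet (((alphabet.toList.idxOf t : Nat) : Int) + r - PySem.Str.len alphabet) with
              | none => dsimp only; rw [foldl_encripStep_err]
              | some c =>
                dsimp only
                exact ih (cont2 + 1) (by omega) (text ++ [String.ofList [c]]) ((if cont = 4 then 0 else cont) + 1)
            · rw [if_neg hgt, if_neg hgt]
              cases ha : PySem.Str.pyGet? alphabet (((alphabet.toList.idxOf t : Nat) : Int) + r) with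
              | none => dsimp only; rw [foldl_encripStep_err]
              | some c =>
                dsimp only
                exact ih (cont2 + 1) (by omega) (text ++ [String.ofList [c]]) ((if cont = 4 then 0 else cont) + 1)
          · rw [if_neg hmem, if_neg hmem]
            exact ih (cont2 + 1) (by omega) (text ++ [String.ofList [t]]) ((if cont = 4 then 0 else cont) + 1)

-- ===== VERDICT (by name: the statement is the Claim_ definition above) =====
theorem encripRecur_spec : Claim_equal_encripRecur := by
  intro clave texto1 text cont cont2 N alphabet _hDom _hPre
  unfold Spec_encripRecur encripRecur_alt
  exact encripRecur_eq_foldl clave texto1 alphabet N (N - cont2).toNat cont2 rfl text cont
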